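-- pv_equiv track=rewrite | github.com/crei-glas/-cyborg-cage-2 | llm_obs_wrapper.py | interpret_action
-- ===== SOURCE A (Python) =====
-- HOST_MAPPING = {
--     0: "Defender",
--     1: "User0",
--     2: "User1",
--     3: "User2",
--     4: "User3",
--     5: "User4",
--     6: "Enterprise0",
--     7: "Enterprise1",
--     8: "Enterprise2",
--     9: "OpServer0",
--     10: "OPServer1",
--     11: "OPServer2",
--     12: "UNKNOWN1",
--     13: "UNKNOWN2"
-- }
--
-- ACTION_CATEGORIES = {
--     "Sleep": [0],
--     "Monitor": [1],
--     "Analyse": list(range(2, 16)),  # Actions 2-15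
--     "Remove": list(range(15, 29)),  # Actions 15-28
--     "Restore": list(range(132, 146))  # Actions 132-145
-- }
--
-- DECOY_MAPPING = {
--     1000: "Enterprise0",
--     1001: "Enterprise1",
--     1002: "Enterprise2",
--     1003: "User1",
--     1004: "User2",
--     1005: "User3",
--     1006: "User4",
--     1007: "Defender",
--     1008: "OpServer0"
-- }
--
-- def interpret_action(action):
--     """Convert a numerical action to a human-readable format."""
--     try:
--         action = int(action)
--     except:
--         # If action is already a string (like from trajectory data)
--         return str(action)
--
--     # Handle decoy actions (special case)
--     if action >= 1000:
--         return f"Deploy Decoy on {DECOY_MAPPING.get(action, 'Unknown Host')}"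
--
--     # Handle regular actions
--     for category, action_ids in ACTION_CATEGORIES.items():
--         if action in action_ids:
--             if category in ["Sleep", "Monitor"]:
--                 return f"{category}"
--             else:
--                 host_id = action - (2 if category == "Analyse" else 15 if category == "Remove" else 132)
--                 host_name = HOST_MAPPING.get(host_id, f"Unknown Host {host_id}")
--                 return f"{category} on {host_name}"
--
--     return f"Unknown Action {action}"
-- ===== SOURCE B (Python) =====
-- HOST_MAPPING = {
--     0: "Defender",
--     1: "User0",
--     2: "User1",
--     3: "User2",
--     4: "User3",
--     5: "User4",
--     6: "Enterprise0",
--     7: "Enterprise1",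
--     8: "Enterprise2",
--     9: "OpServer0",
--     10: "OPServer1",
--     11: "OPServer2",
--     12: "UNKNOWN1",
--     13: "UNKNOWN2"
-- }
--
-- DECOY_MAPPING = {
--     1000: "Enterprise0",
--     1001: "Enterprise1",
--     1002: "Enterprise2",
--     1003: "User1",
--     1004: "User2",
--     1005: "User3",
--     1006: "User4",
--     1007: "Defender",
--     1008: "OpServer0"
-- }
--
-- # One-time lookup table for all regular actions (< 1000).
-- # Analyse is inserted before Remove and setdefault is used for Remove, so the
-- # overlapping action 15 resolves to Analyse, matching the category scan order.
-- _TABLE = {0: "Sleep", 1: "Monitor"}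
-- for _a in range(2, 16):
--     _TABLE[_a] = f"Analyse on {HOST_MAPPING[_a - 2]}"
-- for _a in range(15, 29):
--     _TABLE.setdefault(_a, f"Remove on {HOST_MAPPING[_a - 15]}")
-- for _a in range(132, 146):
--     _TABLE[_a] = f"Restore on {HOST_MAPPING[_a - 132]}"
--
-- def interpret_action(action):
--     """Convert a numerical action to a human-readable format."""
--     try:
--         action = int(action)
--     except:
--         return str(action)
--     if action >= 1000:
--         return f"Deploy Decoy on {DECOY_MAPPING.get(action, 'Unknown Host')}"
--     return _TABLE.get(action, f"Unknown Action {action}")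
-- ===== Notes on version B (the rewrite author's own statement) =====
-- stated objective: simpler
-- what changed: Replaces the per-call scan over ACTION_CATEGORIES (with per-category offset arithmetic and host lookup) by a module-level lookup table precomputed once, built with setdefault so the Analyse/Remove overlap at action 15 resolves as in A's scan order; interpret_action becomes a single dict.get.
import Mathlib
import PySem

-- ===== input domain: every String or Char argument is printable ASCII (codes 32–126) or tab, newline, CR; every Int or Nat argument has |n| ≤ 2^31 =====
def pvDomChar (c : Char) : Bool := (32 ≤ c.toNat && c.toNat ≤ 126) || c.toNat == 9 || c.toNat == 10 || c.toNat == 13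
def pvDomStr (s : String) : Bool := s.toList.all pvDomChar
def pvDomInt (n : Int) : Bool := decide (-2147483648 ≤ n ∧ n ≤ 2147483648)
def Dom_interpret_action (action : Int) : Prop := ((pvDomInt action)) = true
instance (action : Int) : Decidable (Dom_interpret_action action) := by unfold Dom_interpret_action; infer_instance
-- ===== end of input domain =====

-- B replaces A's per-call scan over ACTION_CATEGORIES by a table of final strings
-- precomputed once at module level; objective: simpler (one dict lookup per call).


-- ===== PORT A =====
def HOST_MAPPING : PySem.Dict Int String := PySem.Dict.ofList
  [(0, "Defender"), (1, "User0"), (2, "User1"), (3, "User2"), (4, "User3"),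
   (5, "User4"), (6, "Enterprise0"), (7, "Enterprise1"), (8, "Enterprise2"),
   (9, "OpServer0"), (10, "OPServer1"), (11, "OPServer2"), (12, "UNKNOWN1"),
   (13, "UNKNOWN2")]

def ACTION_CATEGORIES : List (String × List Int) :=
  [("Sleep", [0]), ("Monitor", [1]),
   ("Analyse", PySem.List.pyRange 2 16 1),
   ("Remove", PySem.List.pyRange 15 29 1),
   ("Restore", PySem.List.pyRange 132 146 1)]

def DECOY_MAPPING : PySem.Dict Int String := PySem.Dict.ofList
  [(1000, "Enterprise0"), (1001, "Enterprise1"), (1002, "Enterprise2"),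
   (1003, "User1"), (1004, "User2"), (1005, "User3"), (1006, "User4"),
   (1007, "Defender"), (1008, "OpServer0")]

-- the 'for category, action_ids in ACTION_CATEGORIES.items()' loop with early return
def categoryLoop (action : Int) : List (String × List Int) → String
  | [] => "Unknown Action " ++ PySem.Int.toStr action
  | (category, action_ids) :: rest =>
    if action ∈ action_ids then
      if category = "Sleep" ∨ category = "Monitor" then category
      else
        let host_id := action - (if category = "Analyse" then 2 else if category = "Remove" then 15 else 132)
        category ++ " on " ++ HOST_MAPPING.getD host_id ("Unknown Host " ++ PySem.Int.toStr host_id)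
    else categoryLoop action rest

-- int(action) on an int argument is the identity; the except branch is unreachable for Int input
def interpret_action (action : Int) : String :=
  if action ≥ 1000 then
    "Deploy Decoy on " ++ DECOY_MAPPING.getD action "Unknown Host"
  else
    categoryLoop action ACTION_CATEGORIES

-- ===== PORT B =====
-- _TABLE built once: dict literal, then three range loops (Remove via setdefault).
-- HOST_MAPPING[_a - k] is ported with getD "": the key is always present in these ranges.
def pvTable : PySem.Dict Int String :=
  let t0 : PySem.Dict Int String := PySem.Dict.ofList [(0, "Sleep"), (1, "Monitor")]
  let t1 := (PySem.List.pyRange 2 16 1).foldl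
    (fun t a => t.insert a ("Analyse on " ++ HOST_MAPPING.getD (a - 2) "")) t0
  let t2 := (PySem.List.pyRange 15 29 1).foldl
    (fun t a => PySem.Dict.setdefault t a ("Remove on " ++ HOST_MAPPING.getD (a - 15) "")) t1
  (PySem.List.pyRange 132 146 1).foldl
    (fun t a => t.insert a ("Restore on " ++ HOST_MAPPING.getD (a - 132) "")) t2

def interpret_action_alt (action : Int) : String :=
  if action ≥ 1000 then
    "Deploy Decoy on " ++ DECOY_MAPPING.getD action "Unknown Host"
  else
    pvTable.getD action ("Unknown Action " ++ PySem.Int.toStr action)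

-- ===== PRECONDITION & SPEC =====
def Spec_interpret_action (action : Int) (out : String) : Prop := out = interpret_action_alt action
instance (action : Int) (out : String) : Decidable (Spec_interpret_action action out) := by unfold Spec_interpret_action; infer_instance

-- ===== CLAIM (what is proved, stated in full; the proofs are below) =====
def Claim_equal_interpret_action : Prop := ∀ (action : Int), Dom_interpret_action action → Spec_interpret_action action (interpret_action action)

-- ===== LEMMAS AND PROOFS =====

-- outside all category ranges the table lookup misses
theorem pvTable_get?_none (action : Int)
    (h : ¬ ((0 ≤ action ∧ action ≤ 28) ∨ (132 ≤ action ∧ action ≤ 145))) :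
    pvTable.get? action = none := by
  rw [PySem.Dict.get?_eq_none_iff_not_mem_keys]
  have hk : pvTable.keys = PySem.List.pyRange 0 29 1 ++ PySem.List.pyRange 132 146 1 := by
    set_option maxRecDepth 8192 in decide
  rw [hk]; simp only [List.mem_append, PySem.List.mem_pyRange_one]; omega

-- outside all category ranges A's scan falls through
theorem categoryLoop_miss (action : Int)
    (h : ¬ ((0 ≤ action ∧ action ≤ 28) ∨ (132 ≤ action ∧ action ≤ 145))) :
    categoryLoop action ACTION_CATEGORIES = "Unknown Action " ++ PySem.Int.toStr action := by
  simp only [ACTION_CATEGORIES, categoryLoop, List.mem_singleton, PySem.List.mem_pyRange_one]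
  rw [if_neg (by omega), if_neg (by omega), if_neg (by omega), if_neg (by omega),
      if_neg (by omega)]

-- ===== VERDICT (by name: the statement is the Claim_ definition above) =====
set_option maxRecDepth 8192 in
theorem interpret_action_spec : Claim_equal_interpret_action := by
  intro action _
  unfold Spec_interpret_action interpret_action interpret_action_alt
  by_cases h1000 : action ≥ 1000
  · simp [h1000]
  · simp only [h1000, if_false]
    by_cases hin : (0 ≤ action ∧ action ≤ 28) ∨ (132 ≤ action ∧ action ≤ 145)
    · rcases hin with ⟨ha, hb⟩ | ⟨ha, hb⟩ <;> interval_cases action <;> decide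
    · rw [categoryLoop_miss action hin,
          PySem.Dict.getD_of_get?_eq_none _ _ (pvTable_get?_none action hin)]
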